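-- pv_equiv track=rewrite | github.com/pkuehner/AdventOfCode2024 | 2/2/sol.py | check_line_elements
-- ===== SOURCE A (Python) =====
-- from typing import List
--
-- def check_line_elements(elements: List[int]) -> int:
--     even = False
--     uneven = False
--     for i in range(len(elements)-1):
--         diff = elements[i+1] - elements[i]
--         if diff < 0:
--             uneven = True
--         if diff > 0:
--             even = True
--         if even and uneven:
--             return 0
--         if abs(diff) == 0 or abs(diff)>3:
--             return 0
--     return 1
-- ===== SOURCE B (Python) =====
-- from typing import List
--
-- def check_line_elements(elements: List[int]) -> int:
--     diffs = [b - a for a, b in zip(elements, elements[1:])]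
--     if all(1 <= d <= 3 for d in diffs) or all(-3 <= d <= -1 for d in diffs):
--         return 1
--     return 0
-- ===== Notes on version B (the rewrite author's own statement) =====
-- stated objective: simpler
-- what changed: Replaced the fused single scan with early returns and even/uneven flag tracking by materializing the adjacent-difference list and testing two whole-list range predicates (all in 1..3 or all in -3..-1).
import Mathlib
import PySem

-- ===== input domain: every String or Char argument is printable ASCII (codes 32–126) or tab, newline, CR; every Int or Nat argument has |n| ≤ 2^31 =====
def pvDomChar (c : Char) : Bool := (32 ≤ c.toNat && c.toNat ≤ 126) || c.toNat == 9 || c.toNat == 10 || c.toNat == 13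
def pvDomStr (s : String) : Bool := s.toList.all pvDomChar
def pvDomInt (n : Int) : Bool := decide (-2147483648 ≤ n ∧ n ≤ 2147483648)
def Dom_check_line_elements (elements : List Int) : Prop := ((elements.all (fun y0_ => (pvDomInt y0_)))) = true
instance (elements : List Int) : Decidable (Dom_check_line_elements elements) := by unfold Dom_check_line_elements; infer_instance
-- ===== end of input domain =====

-- B replaces A's fused flag-tracking scan by materializing the adjacent-difference
-- list and testing two whole-list range predicates; objective: simpler.


-- ===== PORT A =====
-- loop over i in range(len(elements)-1) with the two flags; early 'return 0' = result 0
def checkLoopA (elements : List Int) : List Nat → Bool → Bool → Int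
  | [], _, _ => 1
  | i :: rest, even, uneven =>
    let diff := elements.getD (i+1) 0 - elements.getD i 0
    let uneven' := if diff < 0 then true else uneven
    let even' := if diff > 0 then true else even
    if even' && uneven' then 0
    else if diff.natAbs = 0 ∨ diff.natAbs > 3 then 0
    else checkLoopA elements rest even' uneven'

def check_line_elements (elements : List Int) : Int :=
  checkLoopA elements (List.range (elements.length - 1)) false false

-- ===== PORT B =====
def check_line_elements_alt (elements : List Int) : Int :=
  let diffs := (elements.zip elements.tail).map (fun p => p.2 - p.1)
  if (diffs.all fun d => decide (1 ≤ d) && decide (d ≤ 3)) ||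
     (diffs.all fun d => decide (-3 ≤ d) && decide (d ≤ -1)) then 1 else 0

-- ===== PRECONDITION & SPEC =====
def Spec_check_line_elements (elements : List Int) (out : Int) : Prop := out = check_line_elements_alt elements
instance (elements : List Int) (out : Int) : Decidable (Spec_check_line_elements elements out) := by unfold Spec_check_line_elements; infer_instance

-- ===== CLAIM (what is proved, stated in full; the proofs are below) =====
def Claim_equal_check_line_elements : Prop := ∀ (elements : List Int), Dom_check_line_elements elements → Spec_check_line_elements elements (check_line_elements elements)

-- ===== LEMMAS AND PROOFS =====

-- A's loop body, replayed on the precomputed diff list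
def checkLoopD : List Int → Bool → Bool → Int
  | [], _, _ => 1
  | d :: rest, even, uneven =>
    let uneven' := if d < 0 then true else uneven
    let even' := if d > 0 then true else even
    if even' && uneven' then 0
    else if d.natAbs = 0 ∨ d.natAbs > 3 then 0
    else checkLoopD rest even' uneven'

theorem checkLoopA_eq_D (elements : List Int) (is : List Nat) (even uneven : Bool) :
    checkLoopA elements is even uneven
      = checkLoopD (is.map fun i => elements.getD (i+1) 0 - elements.getD i 0) even uneven := by
  induction is generalizing even uneven with
  | nil => rfl
  | cons i rest ih =>
    simp only [checkLoopA, checkLoopD, List.map_cons]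
    split_ifs <;> first | rfl | exact ih _ _

theorem range_map_eq_diffs (elements : List Int) :
    (List.range (elements.length - 1)).map (fun i => elements.getD (i+1) 0 - elements.getD i 0)
      = (elements.zip elements.tail).map (fun p => p.2 - p.1) := by
  apply List.ext_getElem
  · simp [List.length_zip, List.length_tail]
  · intro i h1 h2
    have hlen : i + 1 < elements.length := by
      simp at h1; omega
    simp [List.getElem_zip, List.getElem_tail, List.getD_eq_getElem?_getD,
      List.getElem?_eq_getElem (l := elements) (by omega : i < elements.length),
      List.getElem?_eq_getElem hlen]

theorem checkLoopD_char (ds : List Int) (even uneven : Bool) :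
    checkLoopD ds even uneven =
      if ((ds.all fun d => decide (1 ≤ d) && decide (d ≤ 3)) && !uneven) ||
         ((ds.all fun d => decide (-3 ≤ d) && decide (d ≤ -1)) && !even) ||
         ds.isEmpty then 1 else 0 := by
  induction ds generalizing even uneven with
  | nil => simp [checkLoopD]
  | cons d rest ih =>
    rcases lt_trichotomy d 0 with hd | hd | hd
    · -- d < 0
      have h1 : ¬ d > 0 := by omega
      have h2 : ¬ (1 ≤ d) := by omega
      simp only [checkLoopD, if_pos hd, if_neg h1, Bool.and_true,
        List.all_cons, List.isEmpty_cons]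
      cases even with
      | true => simp [h2]
      | false =>
        simp only [Bool.false_eq_true]
        by_cases habs : d.natAbs = 0 ∨ d.natAbs > 3
        · have h3 : ¬ (-3 ≤ d) := by rcases habs with h | h <;> omega
          simp [h2, h3]
          intro h4 h5; exfalso; rcases habs with h | h <;> omega
        · have hd1 : d ≤ -1 := by omega
          have hd3 : -3 ≤ d := by
            by_contra hc; exact habs (Or.inr (by omega))
          rw [if_neg habs, ih]
          cases rest with
          | nil => simp [hd1, hd3]
          | cons a t => simp [h2, hd1, hd3]
    · subst hd
      simp only [checkLoopD, List.all_cons, List.isEmpty_cons]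
      have : ¬ ((1:Int) ≤ 0) := by omega
      simp
    · -- d > 0
      have h1 : ¬ d < 0 := by omega
      have h2 : ¬ (d ≤ -1) := by omega
      simp only [checkLoopD, if_neg h1, if_pos hd, Bool.true_and,
        List.all_cons, List.isEmpty_cons]
      cases uneven with
      | true => simp [h2]
      | false =>
        simp only [Bool.false_eq_true]
        by_cases habs : d.natAbs = 0 ∨ d.natAbs > 3
        · have h3 : ¬ (d ≤ 3) := by rcases habs with h | h <;> omega
          simp [h2, h3]
          intro h4 h5; exfalso; rcases habs with h | h <;> omega
        · have hd1 : 1 ≤ d := by omega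
          have hd3 : d ≤ 3 := by
            by_contra hc; exact habs (Or.inr (by omega))
          rw [if_neg habs, ih]
          cases rest with
          | nil => simp [hd1, hd3]
          | cons a t => simp [h2, hd1, hd3]

-- ===== VERDICT (by name: the statement is the Claim_ definition above) =====
theorem check_line_elements_spec : Claim_equal_check_line_elements := by
  intro elements _
  unfold Spec_check_line_elements check_line_elements check_line_elements_alt
  rw [checkLoopA_eq_D, range_map_eq_diffs, checkLoopD_char]
  set ds := (elements.zip elements.tail).map (fun p => p.2 - p.1) with hds
  by_cases h : ds = []
  · simp [h]
  · simp [h]
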